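-- pv_equiv track=rewrite | github.com/moogar0880/PySubler | subler/cli.py | pad_to_size
-- ===== SOURCE A (Python) =====
-- def pad_to_size(field, size):
--     """Pad a field to the specified size. Once the field has been padded to the
--     specified size, wrap it in square brackets and return it.
--     """
--     i = 0
--     padded_field = field
--     while len(padded_field) < size:
--         if i % 2 == 0:
--             padded_field = ' ' + padded_field
--         else:
--             padded_field += ' '
--         i += 1
--     return '[' + padded_field + ']:'
-- ===== SOURCE B (Python) =====
-- def pad_to_size(field, size):
--     pad = max(0, size - len(field))
--     return '[' + ' ' * ((pad + 1) // 2) + field + ' ' * (pad // 2) + ']:'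
-- ===== Notes on version B (the rewrite author's own statement) =====
-- stated objective: simpler
-- what changed: Replaces the alternating prepend/append while-loop with a closed-form arithmetic split of the padding: left = (pad+1)//2, right = pad//2, built with string repetition.
import Mathlib
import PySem

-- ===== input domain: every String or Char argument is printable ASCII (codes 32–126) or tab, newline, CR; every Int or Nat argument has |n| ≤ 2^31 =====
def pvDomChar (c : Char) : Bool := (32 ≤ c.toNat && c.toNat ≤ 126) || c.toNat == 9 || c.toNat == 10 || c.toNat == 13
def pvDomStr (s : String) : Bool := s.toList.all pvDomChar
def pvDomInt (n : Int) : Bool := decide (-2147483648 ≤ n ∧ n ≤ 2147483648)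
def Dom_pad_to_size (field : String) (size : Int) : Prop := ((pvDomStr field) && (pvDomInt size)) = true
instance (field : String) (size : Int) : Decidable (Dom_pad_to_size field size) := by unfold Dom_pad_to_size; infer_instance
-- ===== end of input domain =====

-- B replaces A's alternating prepend/append padding loop with a closed-form split of the padding (simpler).


-- ===== PORT A =====
-- the while-loop of A: alternately prepend (i even) / append (i odd) a space until len ≥ size
def padLoopA (size : Int) (i : Nat) (cur : List Char) : List Char :=
  if (cur.length : Int) < size then
    if i % 2 == 0 then padLoopA size (i + 1) (' ' :: cur)
    else padLoopA size (i + 1) (cur ++ [' '])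
  else cur
termination_by (size - cur.length).toNat
decreasing_by all_goals simp_all; omega

def pad_to_size (field : String) (size : Int) : String :=
  String.mk ('[' :: padLoopA size 0 field.toList ++ "]:".toList)

-- ===== PORT B =====
def pad_to_size_alt (field : String) (size : Int) : String :=
  let pad : Int := max 0 (size - field.toList.length)
  String.mk (('[' :: List.replicate (PySem.Int.floordiv (pad + 1) 2).toNat ' ')
    ++ field.toList ++ List.replicate (PySem.Int.floordiv pad 2).toNat ' ' ++ "]:".toList)

-- ===== PRECONDITION & SPEC =====
def Spec_pad_to_size (field : String) (size : Int) (out : String) : Prop := out = pad_to_size_alt field size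
instance (field : String) (size : Int) (out : String) : Decidable (Spec_pad_to_size field size out) := by unfold Spec_pad_to_size; infer_instance

-- ===== CLAIM (what is proved, stated in full; the proofs are below) =====
def Claim_equal_pad_to_size : Prop := ∀ (field : String) (size : Int), Dom_pad_to_size field size → Spec_pad_to_size field size (pad_to_size field size)

-- ===== LEMMAS AND PROOFS =====

theorem padLoopA_eq (p : Nat) (size : Int) (i : Nat) (cur : List Char)
    (hp : (size - cur.length).toNat = p) :
    padLoopA size i cur =
      List.replicate (if i % 2 = 0 then (p + 1) / 2 else p / 2) ' ' ++ cur ++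
      List.replicate (if i % 2 = 0 then p / 2 else (p + 1) / 2) ' ' := by
  induction p generalizing i cur with
  | zero =>
    rw [padLoopA]
    have : ¬ ((cur.length : Int) < size) := by omega
    simp [this]
  | succ p ih =>
    rw [padLoopA]
    have hlt : (cur.length : Int) < size := by omega
    simp only [hlt, if_true]
    by_cases hi : i % 2 = 0
    · have hi1 : (i + 1) % 2 ≠ 0 := by omega
      simp only [hi, beq_iff_eq, if_true]
      rw [ih (i + 1) (' ' :: cur) (by simp; omega)]
      have hi1' : ¬ ((i + 1) % 2 = 0) := hi1
      simp only [hi1', if_false]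
      have h1 : (p + 1 + 1) / 2 = p / 2 + 1 := by omega
      rw [h1, List.replicate_succ']
      simp
    · have hi1 : (i + 1) % 2 = 0 := by omega
      simp only [beq_iff_eq, hi, if_false]
      rw [ih (i + 1) (cur ++ [' ']) (by simp; omega)]
      simp only [hi1, if_true]
      have h1 : (p + 1 + 1) / 2 = p / 2 + 1 := by omega
      rw [h1, List.replicate_succ']
      simp
      rw [← List.replicate_succ, List.replicate_succ']

-- ===== VERDICT (by name: the statement is the Claim_ definition above) =====
theorem pad_to_size_spec : Claim_equal_pad_to_size := by
  intro field size _
  unfold Spec_pad_to_size pad_to_size pad_to_size_alt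
  set p : Nat := (size - field.toList.length).toNat with hp
  rw [padLoopA_eq p size 0 field.toList hp.symm]
  have hmax : max 0 (size - (field.toList.length : Int)) = (p : Int) := by omega
  have h1 : (PySem.Int.floordiv ((p : Int) + 1) 2).toNat = (p + 1) / 2 := by
    rw [PySem.Int.floordiv_eq_ediv_of_pos (by omega : (0:Int) < 2)]; omega
  have h2 : (PySem.Int.floordiv (p : Int) 2).toNat = p / 2 := by
    rw [PySem.Int.floordiv_eq_ediv_of_pos (by omega : (0:Int) < 2)]; omega
  simp only [hmax, h1, h2]
  simp [List.append_assoc]
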